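-- pv_equiv track=rewrite | github.com/KTKarthick006/FFCS-PLANNER | main.py | priority
-- ===== SOURCE A (Python) =====
-- def priority(s)->int:
--     lp=[]
--     if "+" not in s:
--         ls=[s]
--     else:
--         ls=s.split("+")
--     for i in ls:
--         count = 0
--         for j in i:
--             count += ord(j)
--         lp.append(count)
--     count = min(lp)
--     return count
-- ===== SOURCE B (Python) =====
-- def priority(s) -> int:
--     # Single streaming pass: fold char codes into a running segment sum,
--     # folding each finished segment into the running minimum at every '+'.
--     best = None
--     current = 0
--     for ch in s:
--         if ch == '+':
--             best = current if best is None else min(best, current)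
--             current = 0
--         else:
--             current += ord(ch)
--     return current if best is None else min(best, current)
-- ===== Notes on version B (the rewrite author's own statement) =====
-- stated objective: alternative
-- what changed: Replaces split-into-segments, build list of per-segment sums, then min() with one streaming fold over the characters that keeps only a running segment sum and a running minimum (no intermediate lists).
import Mathlib
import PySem

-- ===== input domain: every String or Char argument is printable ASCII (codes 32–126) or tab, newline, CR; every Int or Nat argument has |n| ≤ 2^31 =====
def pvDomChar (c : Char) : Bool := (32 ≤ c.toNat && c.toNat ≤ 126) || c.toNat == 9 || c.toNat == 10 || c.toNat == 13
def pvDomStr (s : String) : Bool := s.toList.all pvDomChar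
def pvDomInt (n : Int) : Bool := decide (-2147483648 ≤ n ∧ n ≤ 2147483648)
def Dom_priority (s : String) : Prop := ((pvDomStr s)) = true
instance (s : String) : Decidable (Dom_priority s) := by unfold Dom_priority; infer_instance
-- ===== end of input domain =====

-- B fuses A's split/sum-list/min phases into one streaming fold over the characters; alternative (same cost), return value only.

-- ===== PORT A =====
-- Port works on s.toList (str = its list of code points); ord j = j.toNat.
-- min(lp): lp always has at least one element (split returns ≥ 1 piece), so the .getD default is unreachable.
def priority (s : String) : Int :=
  let ls : List (List Char) :=
    if PySem.Chars.isIn ['+'] s.toList = false then [s.toList]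
    else PySem.Chars.splitOn s.toList ['+']
  let lp : List Int := ls.foldl (fun lp i =>
    lp ++ [i.foldl (fun count j => count + (j.toNat : Int)) 0]) []
  (PySem.List.min? lp (fun x => x)).getD 0

-- ===== PORT B =====
-- 'current if best is None else min(best, current)'
def pvFoldMin : Option Int → Int → Int
  | none, c => c
  | some m, c => min m c

def priority_alt (s : String) : Int :=
  let st := s.toList.foldl
    (fun (p : Option Int × Int) ch =>
      if ch = '+' then (some (pvFoldMin p.1 p.2), 0) else (p.1, p.2 + (ch.toNat : Int)))
    (none, 0)
  pvFoldMin st.1 st.2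

-- ===== PRECONDITION & SPEC =====
def Spec_priority (s : String) (out : Int) : Prop := out = priority_alt s
instance (s : String) (out : Int) : Decidable (Spec_priority s out) := by unfold Spec_priority; infer_instance

-- ===== CLAIM (what is proved, stated in full; the proofs are below) =====
def Claim_equal_priority : Prop := ∀ (s : String), Dom_priority s → Spec_priority s (priority s)

-- ===== LEMMAS AND PROOFS =====

/-- Reference single-pass split on '+' (characterises `PySem.Chars.splitOn · ['+']`). -/
def pvSplit (pre : List Char) : List Char → List (List Char)
  | [] => [pre]
  | c :: r => if c = '+' then pre :: pvSplit [] r else pvSplit (pre ++ [c]) r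

/-- Sum of char codes of a list. -/
def pvSum (cs : List Char) : Int := cs.foldl (fun c j => c + (j.toNat : Int)) 0

/-- Reference value: min over segment sums, `c` the partial sum of the open segment. -/
def pvSpec (c : Int) : List Char → Int
  | [] => c
  | ch :: r => if ch = '+' then min c (pvSpec 0 r) else pvSpec (c + (ch.toNat : Int)) r

theorem pvSum_shift (cs : List Char) (a : Int) :
    cs.foldl (fun c j => c + (j.toNat : Int)) a
      = a + cs.foldl (fun c j => c + (j.toNat : Int)) 0 := by
  induction cs generalizing a with
  | nil => simp
  | cons c r ih =>
    simp only [List.foldl_cons]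
    rw [ih (a + (c.toNat : Int)), ih ((0 : Int) + (c.toNat : Int))]
    ring

theorem pvSum_cons (c : Char) (r : List Char) :
    pvSum (c :: r) = (c.toNat : Int) + pvSum r := by
  simp only [pvSum, List.foldl_cons]
  rw [pvSum_shift]
  ring

theorem pvSum_append (pre : List Char) (c : Char) :
    pvSum (pre ++ [c]) = pvSum pre + (c.toNat : Int) := by
  simp only [pvSum, List.foldl_append, List.foldl_cons, List.foldl_nil]

theorem splitOn_go_eq (fuel : Nat) (cs cur : List Char) (acc : List (List Char))
    (h : cs.length ≤ fuel) :
    PySem.Chars.splitOn.go ['+'] fuel cs cur acc = acc.reverse ++ pvSplit cur.reverse cs := by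
  induction fuel generalizing cs cur acc with
  | zero =>
    have : cs = [] := List.length_eq_zero_iff.mp (Nat.le_zero.mp h)
    subst this
    simp [PySem.Chars.splitOn.go, pvSplit]
  | succ f ih =>
    cases cs with
    | nil => simp [PySem.Chars.splitOn.go, pvSplit]
    | cons c rest =>
      by_cases hc : c = '+'
      · subst hc
        simp only [PySem.Chars.splitOn.go, List.isPrefixOf, beq_self_eq_true, Bool.true_and,
          if_true]
        rw [show List.drop ['+'].length ('+' :: rest) = rest from rfl]
        rw [ih rest [] _ (by simpa using Nat.le_of_succ_le_succ h)]
        simp [pvSplit]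
      · simp only [PySem.Chars.splitOn.go, List.isPrefixOf]
        rw [if_neg (by
          simp only [Bool.and_eq_true, beq_iff_eq]
          exact fun h2 => hc h2.1.symm)]
        rw [ih rest (c :: cur) acc (by simpa using Nat.le_of_succ_le_succ h)]
        simp [pvSplit, hc]

theorem splitOn_eq (cs : List Char) :
    PySem.Chars.splitOn cs ['+'] = pvSplit [] cs := by
  unfold PySem.Chars.splitOn
  simpa using splitOn_go_eq (cs.length + 1) cs [] [] (by omega)

theorem foldl_snoc (ls : List (List Char)) (acc : List Int) :
    ls.foldl (fun lp i => lp ++ [i.foldl (fun count j => count + (j.toNat : Int)) 0]) acc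
      = acc ++ ls.map pvSum := by
  induction ls generalizing acc with
  | nil => simp
  | cons i t ih => simp [List.foldl_cons, ih, pvSum]

theorem fm_min (b : Option Int) (c x : Int) :
    pvFoldMin b (min c x) = min (pvFoldMin b c) x := by
  cases b <;> simp [pvFoldMin, min_assoc]

theorem foldmin_split (cs : List Char) (x : Int) (pre : List Char) :
    List.foldl min x ((pvSplit pre cs).map pvSum) = min x (pvSpec (pvSum pre) cs) := by
  induction cs generalizing x pre with
  | nil => simp [pvSplit, pvSpec]
  | cons c r ih =>
    by_cases hc : c = '+'
    · subst hc
      simp only [pvSplit, if_true, List.map_cons, List.foldl_cons, pvSpec]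
      rw [ih, show pvSum ([] : List Char) = 0 from rfl, min_assoc]
    · simp only [pvSplit, pvSpec, if_neg hc]
      rw [ih, pvSum_append]

theorem minA_eq (cs pre : List Char) :
    (PySem.List.min? ((pvSplit pre cs).map pvSum) (fun x => x)).getD 0
      = pvSpec (pvSum pre) cs := by
  induction cs generalizing pre with
  | nil => simp [pvSplit, pvSpec, PySem.List.min?]
  | cons c r ih =>
    by_cases hc : c = '+'
    · subst hc
      simp only [pvSplit, if_true, List.map_cons, pvSpec]
      rw [PySem.List.min?_id_cons]
      simp only [Option.getD_some]
      rw [foldmin_split, show pvSum ([] : List Char) = 0 from rfl]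
    · simp only [pvSplit, pvSpec, if_neg hc]
      rw [ih, pvSum_append]

theorem B_fold (cs : List Char) (b : Option Int) (c : Int) :
    (let st := cs.foldl
      (fun (p : Option Int × Int) ch =>
        if ch = '+' then (some (pvFoldMin p.1 p.2), 0) else (p.1, p.2 + (ch.toNat : Int)))
      (b, c)
     pvFoldMin st.1 st.2) = pvFoldMin b (pvSpec c cs) := by
  induction cs generalizing b c with
  | nil => simp [pvSpec]
  | cons ch r ih =>
    by_cases hc : ch = '+'
    · subst hc
      simp only [List.foldl_cons, if_true, pvSpec]
      rw [ih, fm_min]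
      simp [pvFoldMin]
    · simp only [List.foldl_cons, if_neg hc, pvSpec]
      rw [ih]

theorem pvSpec_noplus (cs : List Char) (c : Int) (h : '+' ∉ cs) :
    pvSpec c cs = c + pvSum cs := by
  induction cs generalizing c with
  | nil => simp [pvSpec, pvSum]
  | cons ch r ih =>
    have hch : ch ≠ '+' := fun e => h (e ▸ List.mem_cons_self)
    have hr : '+' ∉ r := fun e => h (List.mem_cons_of_mem _ e)
    simp only [pvSpec, if_neg hch, ih _ hr, pvSum_cons]
    ring

theorem singleton_infix_iff (a : Char) (l : List Char) : [a] <:+: l ↔ a ∈ l := by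
  constructor
  · intro h; exact h.subset (List.mem_singleton_self a)
  · intro h
    obtain ⟨s, t, rfl⟩ := List.append_of_mem h
    exact ⟨s, t, by simp⟩

-- ===== VERDICT (by name: the statement is the Claim_ definition above) =====
theorem priority_spec : Claim_equal_priority := by
  intro s _
  unfold Spec_priority priority priority_alt
  simp only []
  rw [B_fold]
  by_cases h : PySem.Chars.isIn ['+'] s.toList = false
  · have hmem : '+' ∉ s.toList := by
      have := (PySem.Chars.isIn_eq_false_iff ['+'] s.toList).mp h
      exact fun hm => this ((singleton_infix_iff _ _).mpr hm)
    rw [if_pos h, foldl_snoc]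
    simp only [List.nil_append, List.map_cons, List.map_nil]
    rw [PySem.List.min?_id_cons]
    simp only [Option.getD_some, List.foldl_nil]
    rw [pvSpec_noplus _ _ hmem]
    simp [pvFoldMin]
  · rw [if_neg h, splitOn_eq, foldl_snoc]
    simp only [List.nil_append]
    rw [minA_eq]
    rfl
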